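-- pv_equiv track=rewrite | github.com/0BigMax0/CHI_algorithm | CHI_algorithm.py | firstCombinedCost
-- ===== SOURCE A (Python) =====
-- def distance(A,B):
--     "calculate the distance between the point A and point B"
--     return abs(A-B)
--
-- def firstCombinedCost(list_tour,visit_point,neighbour_point,link_value):
--     "calculate the cost of the first combined method "
--     temp2 = []
--     combine_value = []
--     for l in range(-1,len(list_tour)-1):
--         a = (link_value + distance(visit_point,list_tour[l])+distance(neighbour_point,list_tour[l+1])-distance(list_tour[l],list_tour[l+1]))
--         b = (link_value + distance(neighbour_point,list_tour[l])+distance(visit_point,list_tour[l+1])-distance(list_tour[l],list_tour[l+1]))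
--         if a>b:
--             combine_value.append(b)
--             temp2.append([neighbour_point,visit_point])
--         else:
--             combine_value.append(a)
--             temp2.append([visit_point,neighbour_point])
--     combine_cost = min(combine_value)
--     combine_insert_position = combine_value.index(combine_cost)
--     return combine_cost,combine_insert_position
-- ===== SOURCE B (Python) =====
-- def distance(A, B):
--     "calculate the distance between the point A and point B"
--     return abs(A - B)
--
-- def firstCombinedCost(list_tour, visit_point, neighbour_point, link_value):
--     "divide and conquer: recursively find (min cost, first position), no intermediate lists"
--     def cost(i):
--         p = list_tour[i - 1]
--         q = list_tour[i]
--         return (link_value - distance(p, q)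
--                 + min(distance(visit_point, p) + distance(neighbour_point, q),
--                       distance(neighbour_point, p) + distance(visit_point, q)))
--
--     def best(lo, hi):
--         "(min cost, first position attaining it) over positions lo..hi-1"
--         if hi - lo == 1:
--             return cost(lo), lo
--         mid = (lo + hi) // 2
--         left = best(lo, mid)
--         right = best(mid, hi)
--         return left if left[0] <= right[0] else right
--
--     return best(0, len(list_tour))
-- ===== Notes on version B (the rewrite author's own statement) =====
-- stated objective: alternative
-- what changed: B replaces A's staged passes (build the combine_value list, then min(), then .index()) by a recursive divide-and-conquer best(lo,hi) over insertion positions that computes each combined cost on demand and merges halves with a left-preferring <= comparison, keeping the first position of the minimum; no intermediate lists.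
import Mathlib
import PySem

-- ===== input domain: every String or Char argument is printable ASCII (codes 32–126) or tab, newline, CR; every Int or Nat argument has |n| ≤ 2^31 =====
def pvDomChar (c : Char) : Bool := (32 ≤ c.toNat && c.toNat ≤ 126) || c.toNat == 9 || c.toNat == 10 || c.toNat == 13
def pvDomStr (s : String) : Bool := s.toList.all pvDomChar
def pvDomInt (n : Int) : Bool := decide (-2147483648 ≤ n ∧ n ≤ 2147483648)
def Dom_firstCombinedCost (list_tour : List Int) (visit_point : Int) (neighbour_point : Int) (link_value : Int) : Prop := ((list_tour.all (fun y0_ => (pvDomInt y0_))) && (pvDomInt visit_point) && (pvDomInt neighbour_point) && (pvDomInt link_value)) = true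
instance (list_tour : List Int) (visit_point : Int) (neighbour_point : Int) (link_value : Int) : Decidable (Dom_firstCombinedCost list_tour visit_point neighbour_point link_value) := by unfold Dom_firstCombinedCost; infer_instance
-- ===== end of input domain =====

-- B replaces A's build-list/min()/.index() passes by a recursive divide-and-conquer over positions; return value only, no mutation.

-- ===== PORT A =====
-- distance(A,B) = abs(A-B); shared helper, exactly as the Python `distance` is shared by both implementations
def pvDist (a b : Int) : Int := ((a - b).natAbs : Int)

-- loop body of A's for-loop (combine_value.append; temp2 of the Python is dead code for the return value and is omitted)
def pvAStep (list_tour : List Int) (visit_point : Int) (neighbour_point : Int) (link_value : Int) (acc : List Int) (l : Int) : List Int :=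
  let a := link_value + pvDist visit_point (PySem.List.pyGetD list_tour l 0)
             + pvDist neighbour_point (PySem.List.pyGetD list_tour (l+1) 0)
             - pvDist (PySem.List.pyGetD list_tour l 0) (PySem.List.pyGetD list_tour (l+1) 0)
  let b := link_value + pvDist neighbour_point (PySem.List.pyGetD list_tour l 0)
             + pvDist visit_point (PySem.List.pyGetD list_tour (l+1) 0)
             - pvDist (PySem.List.pyGetD list_tour l 0) (PySem.List.pyGetD list_tour (l+1) 0)
  if a > b then acc ++ [b] else acc ++ [a]

def firstCombinedCost (list_tour : List Int) (visit_point : Int) (neighbour_point : Int) (link_value : Int) : Int × Int :=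
  let cv := (PySem.List.pyRange (-1) ((list_tour.length : Int) - 1) 1).foldl
    (pvAStep list_tour visit_point neighbour_point link_value) []
  let cost := (PySem.List.min? cv (fun x => x)).getD 0
  let pos : Int := ((PySem.List.index? cv cost).getD 0 : Nat)
  (cost, pos)

-- ===== PORT B =====
-- B's local `cost(i)`: combined insertion cost at position i (list_tour[i-1] wraps to the last point at i = 0)
def pvCostB (list_tour : List Int) (visit_point : Int) (neighbour_point : Int) (link_value : Int) (i : Nat) : Int :=
  let p := PySem.List.pyGetD list_tour ((i : Int) - 1) 0
  let q := PySem.List.pyGetD list_tour (i : Int) 0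
  link_value - pvDist p q
    + min (pvDist visit_point p + pvDist neighbour_point q)
          (pvDist neighbour_point p + pvDist visit_point q)

-- B's local `best(lo, hi)`: divide and conquer, left branch preferred on ties (first minimal position).
-- `fuel` (= hi - lo at the top call, never exhausted then) and the `hi ≤ lo + 1` guard only totalise the
-- recursion; on the empty range the Python recursion never terminates (outside Pre_)
def pvBestRec (g : Nat → Int) : Nat → Nat → Nat → Int × Nat
  | 0, lo, _ => (g lo, lo)
  | fuel+1, lo, hi =>
    if hi ≤ lo + 1 then (g lo, lo)
    else if (pvBestRec g fuel lo ((lo + hi) / 2)).1 ≤ (pvBestRec g fuel ((lo + hi) / 2) hi).1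
         then pvBestRec g fuel lo ((lo + hi) / 2)
         else pvBestRec g fuel ((lo + hi) / 2) hi

def firstCombinedCost_alt (list_tour : List Int) (visit_point : Int) (neighbour_point : Int) (link_value : Int) : Int × Int :=
  let r := pvBestRec (pvCostB list_tour visit_point neighbour_point link_value)
             list_tour.length 0 list_tour.length
  (r.1, (r.2 : Int))

-- ===== PRECONDITION & SPEC =====
-- Pre_ excludes only the empty tour, on which both Pythons fail (A: ValueError from min([]), B: the recursion never bottoms out)
def Pre_firstCombinedCost (list_tour : List Int) (visit_point : Int) (neighbour_point : Int) (link_value : Int) : Prop := list_tour ≠ []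
instance (list_tour : List Int) (visit_point : Int) (neighbour_point : Int) (link_value : Int) : Decidable (Pre_firstCombinedCost list_tour visit_point neighbour_point link_value) := by unfold Pre_firstCombinedCost; infer_instance
def pvWitness_firstCombinedCost : List Int × Int × Int × Int := ([0, 3, 7], 1, 2, 5)

def Spec_firstCombinedCost (list_tour : List Int) (visit_point : Int) (neighbour_point : Int) (link_value : Int) (out : Int × Int) : Prop := out = firstCombinedCost_alt list_tour visit_point neighbour_point link_value
instance (list_tour : List Int) (visit_point : Int) (neighbour_point : Int) (link_value : Int) (out : Int × Int) : Decidable (Spec_firstCombinedCost list_tour visit_point neighbour_point link_value out) := by unfold Spec_firstCombinedCost; infer_instance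

-- ===== CLAIM (what is proved, stated in full; the proofs are below) =====
def Claim_equal_firstCombinedCost : Prop := ∀ (list_tour : List Int) (visit_point : Int) (neighbour_point : Int) (link_value : Int), Dom_firstCombinedCost list_tour visit_point neighbour_point link_value → Pre_firstCombinedCost list_tour visit_point neighbour_point link_value → Spec_firstCombinedCost list_tour visit_point neighbour_point link_value (firstCombinedCost list_tour visit_point neighbour_point link_value)

-- ===== LEMMAS AND PROOFS =====

-- the per-position combined cost both programs compute
def pvCand (v nb lv p q : Int) : Int :=
  lv - pvDist p q + min (pvDist v p + pvDist nb q) (pvDist nb p + pvDist v q)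

-- running-minimum step on (best, position), fed by enumerate
def pvStep (s : Int × Int) (ic : Int × Int) : Int × Int :=
  if ic.2 < s.1 then (ic.2, ic.1) else s

-- linear reference: (min value, first attaining position) over positions lo … lo+m
def pvLin (g : Nat → Int) (lo : Nat) : Nat → Int × Nat
  | 0 => (g lo, lo)
  | m+1 => if g (lo+m+1) < (pvLin g lo m).1 then (g (lo+m+1), lo+m+1) else pvLin g lo m

theorem pvLin_succ (g : Nat → Int) (lo m : Nat) :
    pvLin g lo (m+1) = if g (lo+m+1) < (pvLin g lo m).1 then (g (lo+m+1), lo+m+1) else pvLin g lo m := rfl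

-- prepending a block: pvLin composes with the divide-and-conquer combine
theorem pvLin_compose (g : Nat → Int) (lo a : Nat) : ∀ b : Nat,
    pvLin g lo (a+b+1)
    = if (pvLin g lo a).1 ≤ (pvLin g (lo+a+1) b).1 then pvLin g lo a else pvLin g (lo+a+1) b := by
  intro b; induction b with
  | zero =>
    show pvLin g lo (a+1) = _
    rw [pvLin_succ]
    show _ = if (pvLin g lo a).1 ≤ (g (lo+a+1), lo+a+1).1 then _ else _
    split_ifs <;> first | rfl | (exfalso; omega)
  | succ b ih =>
    have e1 : a + (b + 1) + 1 = (a + b + 1) + 1 := by ring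
    rw [e1, pvLin_succ, ih, pvLin_succ]
    have e2 : lo + (a + b + 1) + 1 = (lo + a + 1) + b + 1 := by ring
    rw [e2]
    split_ifs <;> first | rfl | (exfalso; omega)

-- the divide-and-conquer recursion computes the linear reference (fuel never runs out)
theorem pvBest_eq_lin (g : Nat → Int) : ∀ (fuel d lo hi : Nat), hi = lo + d + 1 → d + 1 ≤ fuel →
    pvBestRec g fuel lo hi = pvLin g lo d := by
  intro fuel
  induction fuel with
  | zero => intro d lo hi _ hf; exact absurd hf (by omega)
  | succ fuel ih =>
    intro d lo hi he hf
    show (if hi ≤ lo + 1 then (g lo, lo) else _) = _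
    by_cases h : hi ≤ lo + 1
    · rw [if_pos h]
      have hd0 : d = 0 := by omega
      subst hd0; rfl
    · rw [if_neg h]
      have hlm : lo < (lo + hi) / 2 := by omega
      have hmh : (lo + hi) / 2 < hi := by omega
      rw [ih ((lo + hi) / 2 - lo - 1) lo ((lo + hi) / 2) (by omega) (by omega),
          ih (hi - (lo + hi) / 2 - 1) ((lo + hi) / 2) hi (by omega) (by omega)]
      have hc : d = ((lo + hi) / 2 - lo - 1) + (hi - (lo + hi) / 2 - 1) + 1 := by omega
      rw [hc, pvLin_compose]
      have hd2 : lo + ((lo + hi) / 2 - lo - 1) + 1 = (lo + hi) / 2 := by omega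
      rw [hd2]

theorem pv_foldl_min_le (cs : List Int) : ∀ b : Int, cs.foldl min b ≤ b := by
  induction cs with
  | nil => intro b; simp
  | cons x cs ih => intro b; exact le_trans (ih (min b x)) (min_le_left b x)

theorem pv_foldl_min_mem (cs : List Int) : ∀ b : Int, cs.foldl min b = b ∨ cs.foldl min b ∈ cs := by
  induction cs with
  | nil => intro b; left; rfl
  | cons x cs ih =>
    intro b
    rcases ih (min b x) with h | h
    · rw [List.foldl_cons, h]
      rcases le_total b x with hbx | hxb
      · left; exact min_eq_left hbx
      · right; rw [min_eq_right hxb]; exact List.mem_cons_self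
    · right; exact List.mem_cons_of_mem x h

-- the running-minimum fold computes (min, first index of the min)
theorem run_min_spec (cs : List Int) : ∀ (b p s : Int),
    (PySem.List.enumerate cs s).foldl pvStep (b, p)
    = (cs.foldl min b,
       if cs.foldl min b < b then s + (((PySem.List.index? cs (cs.foldl min b)).getD 0 : Nat) : Int) else p) := by
  induction cs with
  | nil =>
    intro b p s
    simp [PySem.List.enumerate_nil]
  | cons x cs ih =>
    intro b p s
    rw [PySem.List.enumerate_cons, List.foldl_cons,
        show pvStep (b, p) (s, x) = if x < b then (x, s) else (b, p) from rfl]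
    by_cases hxb : x < b
    · rw [if_pos hxb, ih x s (s+1), List.foldl_cons, min_eq_right (le_of_lt hxb)]
      have hmle : cs.foldl min x ≤ x := pv_foldl_min_le cs x
      by_cases h2 : cs.foldl min x < x
      · have hmem : cs.foldl min x ∈ cs := by
          rcases pv_foldl_min_mem cs x with h' | h'
          · omega
          · exact h'
        obtain ⟨k, hk⟩ := Option.isSome_iff_exists.mp ((PySem.List.index?_isSome_iff _ _).mpr hmem)
        have hne : x ≠ cs.foldl min x := by omega
        rw [if_pos h2, if_pos (by omega : cs.foldl min x < b),
            PySem.List.index?_cons_of_ne _ hne, hk]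
        simp only [Option.map_some, Option.getD_some, Prod.mk.injEq, true_and]
        push_cast; ring
      · have hmx : cs.foldl min x = x := le_antisymm hmle (not_lt.1 h2)
        rw [if_neg h2, if_pos (by omega : cs.foldl min x < b), hmx, PySem.List.index?_cons_self]
        simp
    · rw [if_neg hxb, ih b p (s+1), List.foldl_cons, min_eq_left (not_lt.1 hxb)]
      by_cases h2 : cs.foldl min b < b
      · have hmem : cs.foldl min b ∈ cs := by
          rcases pv_foldl_min_mem cs b with h' | h'
          · omega
          · exact h'
        obtain ⟨k, hk⟩ := Option.isSome_iff_exists.mp ((PySem.List.index?_isSome_iff _ _).mpr hmem)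
        have hne : x ≠ cs.foldl min b := by have := not_lt.1 hxb; omega
        rw [if_pos h2, if_pos h2, PySem.List.index?_cons_of_ne _ hne, hk]
        simp only [Option.map_some, Option.getD_some, Prod.mk.injEq, true_and]
        push_cast; ring
      · rw [if_neg h2, if_neg h2]

-- A's min() + .index() on a nonempty list is the running-minimum fold
theorem A_min_index (c : Int) (cs : List Int) :
    (((PySem.List.min? (c :: cs) (fun x => x)).getD 0 : Int),
      ((((PySem.List.index? (c :: cs) ((PySem.List.min? (c :: cs) (fun x => x)).getD 0)).getD 0 : Nat)) : Int))
    = (PySem.List.enumerate cs 1).foldl pvStep (c, 0) := by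
  rw [PySem.List.min?_id_cons, run_min_spec cs c 0 1]
  simp only [Option.getD_some]
  have hmle : cs.foldl min c ≤ c := pv_foldl_min_le cs c
  by_cases h : cs.foldl min c < c
  · have hmem : cs.foldl min c ∈ cs := by
      rcases pv_foldl_min_mem cs c with h' | h'
      · omega
      · exact h'
    obtain ⟨k, hk⟩ := Option.isSome_iff_exists.mp ((PySem.List.index?_isSome_iff _ _).mpr hmem)
    have hne : c ≠ cs.foldl min c := by omega
    rw [PySem.List.index?_cons_of_ne _ hne, hk, if_pos h]
    simp only [Option.map_some, Option.getD_some, Prod.mk.injEq, true_and]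
    push_cast; ring
  · have hmc : cs.foldl min c = c := le_antisymm hmle (not_lt.1 h)
    rw [if_neg h, hmc, PySem.List.index?_cons_self]
    simp

-- the running-minimum fold over enumerated costs is the linear reference
theorem foldE (g : Nat → Int) : ∀ (m lo : Nat) (b p : Int),
    (PySem.List.enumerate ((List.range' lo (m+1)).map g) (lo : Int)).foldl pvStep (b, p)
    = if (pvLin g lo m).1 < b then ((pvLin g lo m).1, ((pvLin g lo m).2 : Int)) else (b, p) := by
  intro m
  induction m with
  | zero =>
    intro lo b p
    show pvStep (b, p) ((lo : Int), g lo) = _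
    show (if g lo < b then ((g lo : Int), (lo : Int)) else (b, p)) = _
    rfl
  | succ m ih =>
    intro lo b p
    rw [List.range'_concat, List.map_append, PySem.List.enumerate_append, List.foldl_append, ih]
    simp only [one_mul, List.map_cons, List.map_nil, PySem.List.enumerate_cons,
      PySem.List.enumerate_nil, List.foldl_cons, List.foldl_nil, List.length_map,
      List.length_range']
    rw [pvLin_succ]
    simp only [pvStep]
    rw [show lo + (m + 1) = lo + m + 1 from rfl]
    split_ifs <;>
      first
        | rfl
        | (exfalso; omega)

-- A's candidate list, indexed by insertion position, is the map of B's cost function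
theorem cv_eq (list_tour : List Int) (v nb lv : Int) :
    (PySem.List.pyRange (-1) ((list_tour.length : Int) - 1) 1).map
      (fun l => pvCand v nb lv (PySem.List.pyGetD list_tour l 0) (PySem.List.pyGetD list_tour (l+1) 0))
    = (List.range list_tour.length).map (pvCostB list_tour v nb lv) := by
  rw [PySem.List.pyRange_one, List.map_map]
  have h0 : (((list_tour.length : Int) - 1) - (-1)).toNat = list_tour.length := by omega
  rw [h0]
  apply List.map_congr_left
  intro k _
  show pvCand v nb lv (PySem.List.pyGetD list_tour (-1 + (k : Int)) 0)
         (PySem.List.pyGetD list_tour (-1 + (k : Int) + 1) 0) = _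
  have e1 : (-1 : Int) + (k : Int) = (k : Int) - 1 := by ring
  have e2 : (-1 : Int) + (k : Int) + 1 = (k : Int) := by ring
  rw [e2, e1]
  rfl

-- A's branch "if a>b then b else a" is the combined cost pvCand
theorem pvVal_eq (v nb lv p q : Int) :
    (if lv + pvDist v p + pvDist nb q - pvDist p q > lv + pvDist nb p + pvDist v q - pvDist p q
     then lv + pvDist nb p + pvDist v q - pvDist p q
     else lv + pvDist v p + pvDist nb q - pvDist p q) = pvCand v nb lv p q := by
  simp only [pvCand, pvDist, gt_iff_lt, min_def]
  split_ifs <;> omega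

theorem pvAStep_eq (lt : List Int) (v nb lv : Int) :
    pvAStep lt v nb lv = fun acc l => acc ++ [pvCand v nb lv (PySem.List.pyGetD lt l 0) (PySem.List.pyGetD lt (l+1) 0)] := by
  funext acc l
  dsimp only [pvAStep]
  rw [← pvVal_eq v nb lv (PySem.List.pyGetD lt l 0) (PySem.List.pyGetD lt (l+1) 0)]
  split_ifs <;> rfl

-- A reduced to the running-minimum fold over the shared cost function
theorem A_eq (v nb lv x : Int) (xs : List Int) :
    firstCombinedCost (x::xs) v nb lv
    = (PySem.List.enumerate ((List.range' 1 xs.length).map (pvCostB (x::xs) v nb lv)) 1).foldl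
        pvStep (pvCostB (x::xs) v nb lv 0, 0) := by
  simp only [firstCombinedCost]
  rw [pvAStep_eq, PySem.List.foldl_append_singleton_eq_map, List.nil_append, cv_eq]
  rw [show (x::xs).length = xs.length + 1 from rfl, List.range_eq_range', List.range'_succ,
      List.map_cons]
  exact A_min_index _ _

-- ===== VERDICT (by name: the statement is the Claim_ definition above) =====
theorem firstCombinedCost_spec : Claim_equal_firstCombinedCost := by
  intro lt v nb lv _ hpre
  unfold Spec_firstCombinedCost
  cases lt with
  | nil => exact absurd rfl hpre
  | cons x xs =>
    rw [A_eq]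
    show _ = (let r := pvBestRec (pvCostB (x::xs) v nb lv) (x::xs).length 0 (x::xs).length;
              (r.1, (r.2 : Int)))
    rw [show (x::xs).length = 0 + xs.length + 1 from by simp,
        pvBest_eq_lin (pvCostB (x::xs) v nb lv) (0 + xs.length + 1) xs.length 0
          (0 + xs.length + 1) rfl (by omega)]
    cases hxs : xs.length with
    | zero =>
      simp [PySem.List.enumerate_nil, pvLin]
    | succ m =>
      have hcomp := pvLin_compose (pvCostB (x::xs) v nb lv) 0 0 m
      rw [show (0 : Nat) + m + 1 = m + 1 from by omega,
          show (0 : Nat) + 0 + 1 = 1 from rfl] at hcomp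
      have hfe := foldE (pvCostB (x::xs) v nb lv) m 1 (pvCostB (x::xs) v nb lv 0) 0
      rw [show ((1 : Nat) : Int) = (1 : Int) from rfl] at hfe
      rw [hfe]
      show _ = ((pvLin (pvCostB (x::xs) v nb lv) 0 (m+1)).1,
                ((pvLin (pvCostB (x::xs) v nb lv) 0 (m+1)).2 : Int))
      rw [hcomp, show pvLin (pvCostB (x::xs) v nb lv) 0 0 = (pvCostB (x::xs) v nb lv 0, 0) from rfl]
      split_ifs <;> first | rfl | (exfalso; omega)
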